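-- pv_equiv track=rewrite | github.com/ogilg/Preferences | scripts/eot_transfer/analyze_base_rate.py | majority_choice
-- ===== SOURCE A (Python) =====
-- from collections import Counter, defaultdict
--
-- def majority_choice(choices: list[str]) -> str | None:
--     """Return majority choice, or None if tied."""
--     counts = Counter(c for c in choices if c in ("a", "b"))
--     if not counts:
--         return None
--     (top, top_n), *rest = counts.most_common()
--     if rest and rest[0][1] == top_n:
--         return None  # tie
--     return top
-- ===== SOURCE B (Python) =====
-- def majority_choice(choices: list[str]) -> str | None:
--     """Return majority choice, or None if tied."""
--     score = 0
--     for c in choices: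
--         if c == "a":
--             score += 1
--         elif c == "b":
--             score -= 1
--     return "a" if score > 0 else "b" if score < 0 else None
-- ===== Notes on version B (the rewrite author's own statement) =====
-- stated objective: simpler
-- what changed: Replaces the Counter/most_common tie-inspection with a single signed balance (+1 per 'a', -1 per 'b') whose sign decides the result; the empty/no-valid case and the exact tie both fall out as score == 0.
import Mathlib
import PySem

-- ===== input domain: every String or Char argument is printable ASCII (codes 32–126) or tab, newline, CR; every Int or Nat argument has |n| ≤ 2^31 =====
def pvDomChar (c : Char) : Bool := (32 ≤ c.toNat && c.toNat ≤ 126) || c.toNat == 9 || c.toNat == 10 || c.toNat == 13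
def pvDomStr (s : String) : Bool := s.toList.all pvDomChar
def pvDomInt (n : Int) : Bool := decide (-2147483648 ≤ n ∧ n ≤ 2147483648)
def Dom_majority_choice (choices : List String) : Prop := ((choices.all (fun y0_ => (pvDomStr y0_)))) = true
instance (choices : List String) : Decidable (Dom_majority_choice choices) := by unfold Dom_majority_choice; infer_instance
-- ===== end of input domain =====

-- B replaces Counter/most_common tie inspection by one signed +1/-1 balance; objective: simpler.
-- ===== PORT A =====
def majority_choice (choices : List String) : Option String :=
  let counts := PySem.Dict.counter (choices.filter (fun c => c == "a" || c == "b"))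
  if counts.items = [] then none
  else
    match PySem.List.sorted counts.items (fun p => p.2) true with
    | [] => none  -- unreachable: counts nonempty
    | (top, top_n) :: rest =>
      match rest with
      | [] => some top
      | (_, n2) :: _ => if n2 = top_n then none else some top

-- ===== PORT B =====
-- 'return "a" if score > 0 else "b" if score < 0 else None'
def pvVerdict (score : Int) : Option String :=
  if score > 0 then some "a" else if score < 0 then some "b" else none

def majority_choice_alt (choices : List String) : Option String :=
  pvVerdict (choices.foldl (fun s c =>
    if c == "a" then s + 1 else if c == "b" then s - 1 else s) (0 : Int))

-- ===== PRECONDITION & SPEC =====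
def Spec_majority_choice (choices : List String) (out : Option String) : Prop := out = majority_choice_alt choices
instance (choices : List String) (out : Option String) : Decidable (Spec_majority_choice choices out) := by unfold Spec_majority_choice; infer_instance

-- ===== CLAIM (what is proved, stated in full; the proofs are below) =====
def Claim_equal_majority_choice : Prop := ∀ (choices : List String), Dom_majority_choice choices → Spec_majority_choice choices (majority_choice choices)

-- ===== LEMMAS AND PROOFS =====

-- ===== VERDICT at bottom =====


-- general: B's running balance equals count of "a" minus count of "b"
lemma pv_score_eq (l : List String) (a : Int) :
    l.foldl (fun s c => if c == "a" then s + 1 else if c == "b" then s - 1 else s) a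
      = a + (l.count "a" : Int) - (l.count "b" : Int) := by
  induction l generalizing a with
  | nil => simp
  | cons c t ih =>
    simp only [List.foldl_cons, List.count_cons, ih]
    by_cases h1 : c = "a"
    · subst h1; simp; ring
    · by_cases h2 : c = "b"
      · subst h2; simp; ring
      · simp [h1, h2]

lemma pv_alt_char (choices : List String) :
    majority_choice_alt choices =
      (if (choices.count "b" : Int) < choices.count "a" then some "a"
       else if (choices.count "a" : Int) < choices.count "b" then some "b" else none) := by
  unfold majority_choice_alt pvVerdict
  rw [pv_score_eq]
  split_ifs <;> first | rfl | omega

lemma pv_nodup_ab (l : List String) (hnd : l.Nodup) (h : ∀ x ∈ l, x = "a" ∨ x = "b") :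
    l = [] ∨ l = ["a"] ∨ l = ["b"] ∨ l = ["a", "b"] ∨ l = ["b", "a"] := by
  match l with
  | [] => simp
  | [x] => rcases h x (by simp) with h' | h' <;> simp [h']
  | x :: y :: z :: t =>
    exfalso
    rcases h x (by simp) with h1 | h1 <;> rcases h y (by simp) with h2 | h2 <;>
      rcases h z (by simp) with h3 | h3 <;> simp_all
  | [x, y] =>
    rcases h x (by simp) with h1 | h1 <;> rcases h y (by simp) with h2 | h2 <;> simp_all

lemma pv_sorted_two (x y : Int) :
    PySem.List.sorted [("a", x), ("b", y)] (fun p => p.2) true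
      = if x < y then [("b", y), ("a", x)] else [("a", x), ("b", y)] := by
  rw [PySem.List.sorted_rev_eq_foldl_insertBy]
  simp [PySem.List.insertBy]

lemma pv_sorted_two' (x y : Int) :
    PySem.List.sorted [("b", y), ("a", x)] (fun p => p.2) true
      = if y < x then [("a", x), ("b", y)] else [("b", y), ("a", x)] := by
  rw [PySem.List.sorted_rev_eq_foldl_insertBy]
  simp [PySem.List.insertBy]

theorem majority_choice_spec : Claim_equal_majority_choice := by
  intro choices _
  unfold Spec_majority_choice
  rw [pv_alt_char]
  unfold majority_choice
  set xs := choices.filter (fun c => c == "a" || c == "b") with hxs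
  have hca : xs.count "a" = choices.count "a" := by
    simp [hxs, List.count_filter]
  have hcb : xs.count "b" = choices.count "b" := by
    simp [hxs, List.count_filter]
  have hmem : ∀ x ∈ PySem.Set.ofList xs, x = "a" ∨ x = "b" := by
    intro x hx
    rw [PySem.Set.mem_ofList] at hx
    have := List.of_mem_filter hx
    simpa using this
  have hS := pv_nodup_ab _ (PySem.Set.nodup_ofList xs) hmem
  have hItems : (PySem.Dict.counter xs).items
      = (PySem.Set.ofList xs).map (fun k => (k, (xs.count k : Int))) :=
    PySem.Dict.items_counter xs
  have hmemA : ("a" ∈ PySem.Set.ofList xs) ↔ 0 < xs.count "a" := by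
    rw [PySem.Set.mem_ofList]; exact List.count_pos_iff.symm
  have hmemB : ("b" ∈ PySem.Set.ofList xs) ↔ 0 < xs.count "b" := by
    rw [PySem.Set.mem_ofList]; exact List.count_pos_iff.symm
  rcases hS with h | h | h | h | h <;>
    rw [← hca, ← hcb] <;>
    simp only [hItems, h, List.map] at *
  · -- S = []: no valid votes
    have h0 : xs.count "a" = 0 := by
      by_contra hc
      exact absurd (hmemA.mpr (Nat.pos_of_ne_zero hc)) (by simp)
    have h0' : xs.count "b" = 0 := by
      by_contra hc
      exact absurd (hmemB.mpr (Nat.pos_of_ne_zero hc)) (by simp)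
    simp [h0, h0']
  · -- S = ["a"]
    have ha : 0 < xs.count "a" := hmemA.mp (by simp)
    have hb : xs.count "b" = 0 := by
      by_contra hc
      exact absurd (hmemB.mpr (Nat.pos_of_ne_zero hc)) (by simp)
    rw [PySem.List.sorted_rev_eq_foldl_insertBy]
    simp [PySem.List.insertBy, hb]
    exact List.count_pos_iff.mp ha
  · -- S = ["b"]
    have hb : 0 < xs.count "b" := hmemB.mp (by simp)
    have ha : xs.count "a" = 0 := by
      by_contra hc
      exact absurd (hmemA.mpr (Nat.pos_of_ne_zero hc)) (by simp)
    rw [PySem.List.sorted_rev_eq_foldl_insertBy]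
    simp [PySem.List.insertBy, ha]
    rw [if_neg (by omega), if_pos (List.count_pos_iff.mp hb)]
  · -- S = ["a","b"]
    rw [pv_sorted_two]
    split_ifs <;> simp_all <;> omega
  · -- S = ["b","a"]
    rw [pv_sorted_two']
    split_ifs <;> simp_all <;> omega
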